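-- pv_equiv track=rewrite | github.com/ViktorVlaznev/gb_task_python | Seminar6/task3.py | GetIrreducibleFractionPrimeNumbers
-- ===== SOURCE A (Python) =====
-- def GetListPrimeNumber(number):
--     listPrimeNumber = [1]
--     for num in range(2, number + 1):
--         for i in range(2,num):
--             if (num % i) == 0:
--                 break
--         else:
--             listPrimeNumber.append(num)
--     return listPrimeNumber
--
-- def  GetIrreducibleFractionPrimeNumbers(number):
--     listPrimeNumber =  GetListPrimeNumber(number)
--     listFraction = []
--     for i in range(len(listPrimeNumber)):
--         for j in range(i,len(listPrimeNumber)):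
--             if i != j:
--                 listFraction.append(str(listPrimeNumber[i]) + "/" + str(listPrimeNumber[j]))
--     return listFraction
-- ===== SOURCE B (Python) =====
-- def _is_prime(n):
--     d = 2
--     while d * d <= n:
--         if n % d == 0:
--             return False
--         d += 1
--     return True
--
--
-- def GetIrreducibleFractionPrimeNumbers(number):
--     primes = [1] + [n for n in range(2, number + 1) if _is_prime(n)]
--     res = []
--     rest = primes
--     while rest:
--         p = rest[0]
--         rest = rest[1:]
--         for q in rest:
--             res.append(str(p) + "/" + str(q))
--     return res
-- ===== Notes on version B (the rewrite author's own statement) =====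
-- stated objective: faster
-- what changed: Prime detection uses trial division only up to sqrt(n) (while d*d<=n) instead of testing every divisor in 2..n-1, and the fraction pairs are built by structural recursion on list suffixes (head vs rest) instead of nested index loops over range(len).
import Mathlib
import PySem

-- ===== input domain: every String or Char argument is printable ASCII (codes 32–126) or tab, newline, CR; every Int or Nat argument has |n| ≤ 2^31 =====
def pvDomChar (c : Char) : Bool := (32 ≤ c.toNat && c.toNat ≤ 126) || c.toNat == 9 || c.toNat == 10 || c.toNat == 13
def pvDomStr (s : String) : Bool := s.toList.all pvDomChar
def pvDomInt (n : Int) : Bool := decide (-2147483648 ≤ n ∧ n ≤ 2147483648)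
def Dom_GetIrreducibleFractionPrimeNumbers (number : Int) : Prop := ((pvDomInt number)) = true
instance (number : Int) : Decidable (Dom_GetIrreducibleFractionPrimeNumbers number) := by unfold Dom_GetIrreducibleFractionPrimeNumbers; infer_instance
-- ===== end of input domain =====

-- B replaces A's full-range trial division by a sqrt-bounded one and builds the
-- fraction pairs by recursion on list suffixes instead of nested index loops.

-- ===== PORT A =====
def GetListPrimeNumber (number : Int) : List Int :=
  (PySem.List.pyRange 2 (number + 1) 1).foldl
    (fun acc num =>
      if (PySem.List.pyRange 2 num 1).any (fun i => PySem.Int.mod num i == 0) then acc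
      else acc ++ [num]) [1]

def GetIrreducibleFractionPrimeNumbers (number : Int) : List String :=
  let L := GetListPrimeNumber number
  (PySem.List.pyRange 0 (L.length : Int) 1).foldl
    (fun acc i =>
      (PySem.List.pyRange i (L.length : Int) 1).foldl
        (fun acc2 j =>
          if i ≠ j then
            acc2 ++ [PySem.Int.toStr (PySem.List.pyGetD L i 0) ++ "/" ++ PySem.Int.toStr (PySem.List.pyGetD L j 0)]
          else acc2) acc) []

-- ===== PORT B =====
-- while d * d <= n: if n % d == 0: return False; d += 1 — sqrt-bounded trial division
def pvTrial (n : Int) (d : Nat) : Bool :=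
  if h : (d : Int) * d ≤ n then
    if PySem.Int.mod n d == 0 then false else pvTrial n (d + 1)
  else true
termination_by (n + 1 - d).toNat
decreasing_by
  rcases Nat.eq_zero_or_pos d with h0 | h1
  · subst h0; simp at h ⊢; omega
  · have h1' : (1 : Int) ≤ (d : Int) := by exact_mod_cast h1
    have hdn : (d : Int) ≤ n := le_trans (by nlinarith [h1']) h
    omega

-- the while-rest loop of B: peel the head, pair it with the rest, recurse
def pvPairUp : List Int → List String
  | [] => []
  | p :: rest =>
      rest.map (fun q => PySem.Int.toStr p ++ "/" ++ PySem.Int.toStr q) ++ pvPairUp rest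

def GetIrreducibleFractionPrimeNumbers_alt (number : Int) : List String :=
  pvPairUp (1 :: (PySem.List.pyRange 2 (number + 1) 1).filter (fun n => pvTrial n 2))

-- ===== PRECONDITION & SPEC =====
def Spec_GetIrreducibleFractionPrimeNumbers (number : Int) (out : List String) : Prop := out = GetIrreducibleFractionPrimeNumbers_alt number
instance (number : Int) (out : List String) : Decidable (Spec_GetIrreducibleFractionPrimeNumbers number out) := by unfold Spec_GetIrreducibleFractionPrimeNumbers; infer_instance

-- ===== CLAIM (what is proved, stated in full; the proofs are below) =====
def Claim_equal_GetIrreducibleFractionPrimeNumbers : Prop := ∀ (number : Int), Dom_GetIrreducibleFractionPrimeNumbers number → Spec_GetIrreducibleFractionPrimeNumbers number (GetIrreducibleFractionPrimeNumbers number)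

-- ===== LEMMAS AND PROOFS =====

-- pvTrial n d0 is true iff no d ≥ d0 with d*d ≤ n divides n
theorem pvTrial_eq_true_iff (n : Int) (d0 : Nat) :
    pvTrial n d0 = true ↔ ∀ d : Nat, d0 ≤ d → (d : Int) * d ≤ n → ¬ ((d : Int) ∣ n) := by
  fun_induction pvTrial n d0 with
  | case1 d hle heq =>
      simp only [Bool.false_eq_true, false_iff]
      intro H
      exact H d le_rfl hle ((PySem.Int.mod_eq_zero_iff_dvd _ _).mp (by simpa using heq))
  | case2 d hle hne ih =>
      rw [ih]
      constructor
      · intro H e hde hsq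
        rcases Nat.lt_or_ge d e with hlt | hge
        · exact H e hlt hsq
        · have he : e = d := le_antisymm hge hde
          subst he
          intro hdvd
          exact hne (by simp [(PySem.Int.mod_eq_zero_iff_dvd _ _).mpr hdvd])
      · intro H e hde hsq
        exact H e (by omega) hsq
  | case3 d hnle =>
      simp only [true_iff]
      intro e hde hsq hdvd
      apply hnle
      have hce : (d : Int) ≤ (e : Int) := by exact_mod_cast hde
      nlinarith [Int.natCast_nonneg d, Int.natCast_nonneg e]

-- the sqrt-bounded test agrees with A's full-range test for 2 ≤ n
theorem pvTrial_eq_not_any (n : Int) (hn : 2 ≤ n) :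
    pvTrial n 2 = ! (PySem.List.pyRange 2 n 1).any (fun i => PySem.Int.mod n i == 0) := by
  cases hany : (PySem.List.pyRange 2 n 1).any (fun i => PySem.Int.mod n i == 0) with
  | false =>
      simp only [Bool.not_false]
      rw [pvTrial_eq_true_iff]
      intro d hd hsq hdvd
      have hd2 : (2 : Int) ≤ (d : Int) := by exact_mod_cast hd
      have hdn : (d : Int) < n := by nlinarith
      have hex : (PySem.List.pyRange 2 n 1).any (fun i => PySem.Int.mod n i == 0) = true :=
        List.any_eq_true.mpr ⟨(d : Int),
          by rw [PySem.List.mem_pyRange_one]; exact ⟨hd2, hdn⟩,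
          by simp [(PySem.Int.mod_eq_zero_iff_dvd n (d : Int)).mpr hdvd]⟩
      rw [hany] at hex
      exact Bool.noConfusion hex
  | true =>
      simp only [Bool.not_true]
      rw [Bool.eq_false_iff, Ne, pvTrial_eq_true_iff]
      intro H
      rw [List.any_eq_true] at hany
      obtain ⟨i, hmem, hdvd⟩ := hany
      rw [PySem.List.mem_pyRange_one] at hmem
      obtain ⟨hi2, hin⟩ := hmem
      have hdvd' : i ∣ n := (PySem.Int.mod_eq_zero_iff_dvd n i).mp (by simpa using hdvd)
      obtain ⟨k, hk⟩ := hdvd'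
      have hipos : (0 : Int) < i := by omega
      have hk1 : 1 < k := by nlinarith
      by_cases hsq : i * i ≤ n
      · have hci : ((i.toNat : Nat) : Int) = i := Int.toNat_of_nonneg (by omega)
        exact H i.toNat (by omega) (by rw [hci]; exact hsq) (by rw [hci]; exact ⟨k, hk⟩)
      · have hki : k < i := by nlinarith
        have hksq : k * k ≤ n := by nlinarith
        have hck : ((k.toNat : Nat) : Int) = k := Int.toNat_of_nonneg (by omega)
        exact H k.toNat (by omega) (by rw [hck]; exact hksq)
          (by rw [hck]; exact ⟨i, by rw [hk]; ring⟩)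

-- 'for …: if q(x): continue else out.append(x)' is a filter by !q
theorem pvFoldlSkip {a : Type} (q : a → Bool) (l : List a) (init : List a) :
    l.foldl (fun acc x => if q x then acc else acc ++ [x]) init
      = init ++ l.filter (fun x => !q x) := by
  induction l generalizing init with
  | nil => simp
  | cons x xs ih => cases hq : q x <;> simp [hq, ih]

-- the two prime lists coincide
theorem primeList_eq (number : Int) :
    GetListPrimeNumber number
      = 1 :: (PySem.List.pyRange 2 (number + 1) 1).filter (fun n => pvTrial n 2) := by
  rw [GetListPrimeNumber, pvFoldlSkip]
  have hfc : (PySem.List.pyRange 2 (number + 1) 1).filter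
        (fun num => !(PySem.List.pyRange 2 num 1).any (fun i => PySem.Int.mod num i == 0))
      = (PySem.List.pyRange 2 (number + 1) 1).filter (fun n => pvTrial n 2) :=
    List.filter_congr (fun x hx => by
      rw [PySem.List.mem_pyRange_one] at hx
      exact (pvTrial_eq_not_any x hx.1).symm)
  rw [hfc]
  rfl

-- index form of pvPairUp
theorem pvPairUp_eq_flatMap (L : List Int) :
    pvPairUp L = (List.range L.length).flatMap
      (fun k => (L.drop (k + 1)).map (fun q => PySem.Int.toStr (L.getD k 0) ++ "/" ++ PySem.Int.toStr q)) := by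
  induction L with
  | nil => simp [pvPairUp]
  | cons p rest ih =>
      rw [pvPairUp, ih]
      simp [List.range_succ_eq_map, List.flatMap_map, Nat.succ_eq_add_one]

-- A's nested index loops compute pvPairUp
theorem pairLoop_eq (L : List Int) :
    (PySem.List.pyRange 0 (L.length : Int) 1).foldl
      (fun acc i =>
        (PySem.List.pyRange i (L.length : Int) 1).foldl
          (fun acc2 j =>
            if i ≠ j then
              acc2 ++ [PySem.Int.toStr (PySem.List.pyGetD L i 0) ++ "/" ++ PySem.Int.toStr (PySem.List.pyGetD L j 0)]
            else acc2) acc) []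
      = pvPairUp L := by
  have inner : ∀ (i : Nat), i < L.length → ∀ acc : List String,
      (PySem.List.pyRange (i : Int) (L.length : Int) 1).foldl
        (fun acc2 j =>
          if (i : Int) ≠ j then
            acc2 ++ [PySem.Int.toStr (PySem.List.pyGetD L (i : Int) 0) ++ "/" ++ PySem.Int.toStr (PySem.List.pyGetD L j 0)]
          else acc2) acc
      = acc ++ (L.drop (i + 1)).map (fun q => PySem.Int.toStr (L.getD i 0) ++ "/" ++ PySem.Int.toStr q) := by
    intro i hi acc
    rw [PySem.List.pyRange_one_cons (by exact_mod_cast hi)]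
    simp only [List.foldl_cons, ne_eq, not_true_eq_false, if_false]
    rw [PySem.List.foldl_congr_mem _ _
        (fun acc2 j =>
          acc2 ++ [PySem.Int.toStr (PySem.List.pyGetD L (i : Int) 0) ++ "/" ++ PySem.Int.toStr (PySem.List.pyGetD L j 0)]) _
        (fun acc2 j hj => by
          rw [PySem.List.mem_pyRange_one] at hj
          rw [if_pos (by omega)])]
    rw [PySem.List.foldl_pyRange_pyGetD' L 0
        (fun acc2 q => acc2 ++ [PySem.Int.toStr (PySem.List.pyGetD L (i : Int) 0) ++ "/" ++ PySem.Int.toStr q]) acc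
        (a := (i : Int) + 1) (by omega)]
    rw [PySem.List.foldl_append_singleton_eq_map]
    have h1 : ((i : Int) + 1).toNat = i + 1 := by omega
    rw [h1, PySem.List.pyGetD_natCast]
  rw [PySem.List.foldl_congr_mem _ _
      (fun (acc : List String) (i : Int) =>
        acc ++ (L.drop (i.toNat + 1)).map (fun q => PySem.Int.toStr (L.getD i.toNat 0) ++ "/" ++ PySem.Int.toStr q)) _
      (fun acc i hi => by
        rw [PySem.List.mem_pyRange_one] at hi
        have hcast : ((i.toNat : Nat) : Int) = i := Int.toNat_of_nonneg hi.1
        have hlt : i.toNat < L.length := by omega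
        calc _ = acc ++ (L.drop (i.toNat + 1)).map
                  (fun q => PySem.Int.toStr (L.getD i.toNat 0) ++ "/" ++ PySem.Int.toStr q) := by
                rw [← hcast]; exact inner i.toNat hlt acc
             _ = _ := rfl)]
  rw [PySem.List.foldl_append_eq_flatMap]
  rw [PySem.List.pyRange_zero_nat, List.flatMap_map]
  rw [pvPairUp_eq_flatMap]
  simp

-- ===== VERDICT (by name: the statement is the Claim_ definition above) =====
theorem GetIrreducibleFractionPrimeNumbers_spec : Claim_equal_GetIrreducibleFractionPrimeNumbers := by
  intro number _
  unfold Spec_GetIrreducibleFractionPrimeNumbers GetIrreducibleFractionPrimeNumbers GetIrreducibleFractionPrimeNumbers_alt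
  rw [primeList_eq]
  exact pairLoop_eq _
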